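/- GENERATED by tools/from_farm_form.py from prooffarm-gif/accepted/DGifGetExtensionNext.1/Lemmas.lean (a worked proof of the farm's unit `DGifGetExtensionNext.1`,
   accepted by the verdict) — do not edit. -/
import Gif.Spec.Units.DGifGetExtensionNext_1
import Gif.Spec.AllSegs

/-!
  Lemmas for the unit `DGifGetExtensionNext.1` (a BODY segment of a protected function: the checked load of `gif.Private`, a reader
  call into the object `Buf` of the OWN frame, then either the exit `AfterLen` or the checked store of `gif.Error`): the segment is
  walked in TWO STEPS that meet at the call's return address 0x10988b (`ret2`), with a private assertion there.

      gen1_AtRet2      the assertion at `ret2`: `Body` + the registers and facts that are live THERE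
      gen1_seg_call    0x10986c … the call of InternalRead … 0x10988b: `Start` → `gen1_AtRet2`
      gen1_seg_tail    0x10988b … 0x1098a6 (`Done`) or 0x1098c3 (`AfterLen`): `gen1_AtRet2` → the exits
-/

open X86 X86.User Asan ProgX.Base ProgX.Base.Spec Gif.Spec

set_option maxRecDepth 4000
set_option maxHeartbeats 4000000

namespace Gif.Spec.DGifGetExtensionNext_1

/-- **At 10988BH (ret2), `InternalRead(gif, &Buf, 1)` has returned**: `Body`, `r15 = pv`, `eax = k ≤ 1` the bytes delivered, and
`k = 1` means the reader advanced by exactly 1. -/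
structure gen1_AtRet2 (H : Heap) (rest : List Obj) (frames : List (Nat × FrameLayout)) (F : Forest) (R : Rd) (u₀ e : State)
    (ret : Word) (v : State) : Prop where
  body : DGifGetExtensionNext.Body Gif.L.DGifGetExtensionNext.ret2 H rest frames F R u₀ e ret v
  r15 : (v.reg .r15).toNat = F.pv
  count : (v.reg .rax).toNat ≤ 1
  adv : (v.reg .rax).toNat = 1 → rem R v.mem + 1 = rem R e.mem

/-- **10986CH … the call of InternalRead … 10988BH (ret2)** (dgif_lib.c:600 `Private = GifFile->Private`, l.603
`InternalRead(GifFile, &Buf, 1)`). `edx = 1`, `rsi = &Buf = RA − 88` (the frame's object `Buf` at base + 32), `rdi = gif`. -/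
theorem gen1_seg_call (Lay : Layout) (hLay : Lay.hi = 0x1000000) (μ : Microarch) (hμ : UserX.MicroOK μ) (u₀ : State)
    (hcode : HasCodeNat Lay u₀ Gif.L.DGifGetExtensionNext.entry Gif.Code.code_DGifGetExtensionNext.nat
      Gif.L.DGifGetExtensionNext.size)
    (H : Heap) (rest : List Obj) (frames : List (Nat × FrameLayout)) (F : Forest) (R : Rd) (e : State) (ret : Word)
    (h_InternalRead : Calls Lay μ ProgX.Base.WayInv (ProgX.Base.conv u₀) Gif.L.InternalRead.entry
      (Gif.Spec.InternalRead.spec H rest (DGifGetExtensionNext.framesIn frames e) F R 1))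
    (h_asan_load8_noabort : Asan.SmallCheck Lay μ ProgX.Base.WayInv (ProgX.Base.CodeOK u₀) [.rax, .rcx, .rdx] 8
      ProgX.Base.L.__asan_load8_noabort.entry)
    (v : State) (hat : DGifGetExtensionNext.Start H rest frames F R u₀ e ret v) :
    ReachVia Lay μ ProgX.Base.WayInv v (gen1_AtRet2 H rest frames F R u₀ e ret) := by
  -- THE PRELUDE: the entry assertion `Start` = `Body` + `rdi = gif` + the reader has not moved
  obtain ⟨hbody, c_rdi, hrem_eq⟩ := hat
  have he := hbody.entry
  v_entry he
  obtain ⟨henv, hrdi, hext⟩ := hbody.pre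
  have w_rip := hbody.rip
  have c_rsp : v.reg .rsp = e.reg .rsp - 136 := hbody.rsp
  have c_rbx : v.reg .rbx = e.reg .rdi := hbody.rbx
  have w_kept : RegsKept [.rsp] v v := RegsKept.refl _ _
  have w_eq : Mem.EqOn ProgX.Base.L.textLo ProgX.Base.L.textHi u₀.mem v.mem := ProgX.Base.conv_code_eqOn hbody.code
  have hdf := (show abiInv _ from hbody.abi).1
  have hmx := (show abiInv _ from hbody.abi).2
  have hsse := ProgX.Base.sseOK_of_abiInv hbody.abi
  -- the slots and the footprint that `Body` at the exit states again
  have k_r15 : v.mem.readLE (e.reg .rsp - 8) 8 = (e.reg .r15).toNat := hbody.slot_r15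
  have k_r14 : v.mem.readLE (e.reg .rsp - 16) 8 = (e.reg .r14).toNat := hbody.slot_r14
  have k_r13 : v.mem.readLE (e.reg .rsp - 24) 8 = (e.reg .r13).toNat := hbody.slot_r13
  have k_r12 : v.mem.readLE (e.reg .rsp - 32) 8 = (e.reg .r12).toNat := hbody.slot_r12
  have k_rbp : v.mem.readLE (e.reg .rsp - 40) 8 = (e.reg .rbp).toNat := hbody.slot_rbp
  have k_rbx : v.mem.readLE (e.reg .rsp - 48) 8 = (e.reg .rbx).toNat := hbody.slot_rbx
  have k_ra : UInt64.ofNat (v.mem.readLE (e.reg .rsp) 8) = ret := hbody.slot_ra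
  have hsame : Mem.SameExcept
    [⟨(e.reg .rsp).toNat - 320, (e.reg .rsp).toNat⟩,
     shadowSpan ((e.reg .rsp).toNat - 120) ((e.reg .rsp).toNat - 56),
     ⟨F.pv + 88, F.pv + 344⟩,
     ⟨(e.reg .rsi).toNat, (e.reg .rsi).toNat + 8⟩,
     ⟨F.gif + 96, F.gif + 100⟩,
     ⟨R.cur, R.cur + 8⟩] e.mem v.mem := hbody.same
  -- where the cursor and gif are, as numbers
  have hcur := henv.ctx.cursor_range henv.heap.inv.shadow
  have hgin := henv.ok.owns.inside henv.heap.inv.heap (o := (F.gif, 120)) List.mem_cons_self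
  have hbase := henv.heap.base
  simp only at hgin
  rw [hbase] at hgin
  obtain ⟨hg1, -, -, -, hg2⟩ := hgin
  have hpin := henv.ok.owns.inside henv.heap.inv.heap (o := (F.pv, 24936)) (List.mem_cons_of_mem _ List.mem_cons_self)
  simp only at hpin
  rw [hbase] at hpin
  obtain ⟨hp1, -, -, -, hp2⟩ := hpin
  -- the load of `gif.Private`, as a fact about the segment's entry memory in the walker's form
  have hpriv := hbody.ok.shape.priv
  simp only [gfield] at hpriv
  have l_priv : v.mem.readLE (e.reg .rdi + 0x70) 8 = F.pv := by
    rw [rd_eq_readLE v.mem (e.reg .rdi + 0x70) (F.gif + 112) 8 (by u_omega)]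
    exact hpriv
  -- gif is live under the body's frames: what the check goal asks
  have hgl : LiveIn (H.liveObjs ++ rest) (DGifGetExtensionNext.framesIn frames e) F.gif 120 :=
    hbody.ok.gif_live.liveIn rest _ (Nat.le_refl _) (Nat.le_refl _)
  -- THE WALK, to the call's return address
  u_walk hcode [hμ.vendor] until [Gif.L.DGifGetExtensionNext.ret2] span [ProgX.Base.L.textLo, ProgX.Base.L.textHi] side (v_side)
  case check_109870 =>
    -- dgif_lib.c:600 the load of `gif.Private`: 8 bytes inside gif
    have hun : ShadowUntouched v.mem s_109870.mem := by v_untouched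
    exact hgl.accSmall hbody.inv.shadow hun _ 8 (by decide) (by u_omega) (by u_omega)
  case call_inv =>
    v_inv
  case pre_109886 =>
    -- INTERNALREAD'S PRECONDITION. The environment for the frame list with the own frame in front: only the return address was
    -- pushed since `v`
    have hs : Mem.SameExcept [⟨(e.reg .rsp).toNat - 320, (e.reg .rsp).toNat - 136⟩] v.mem s_109886.mem := by
      rw [w_mem]
      u_same
    have henv' : Env H rest (DGifGetExtensionNext.framesIn frames e) F R s_109886 := by
      refine henv.at_call hbody.inv hbody.ok hs (by omega) (by omega) ?_ ?_ ?_
      · rw [w_rsp]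
        u_omega
      · rw [w_rsp]
        u_omega
      · rw [w_rsp]
        u_omega
    -- the buffer is the frame's object `Buf` (`[rsp + 0x30]` = base + 32, 1 byte), named by its numbers
    have ho : (⟨(e.reg .rsp).toNat - 120 + 32, 1, .stack⟩ : Obj) ∈
        Gif.Frames.DGifGetExtensionNext.objsAt ((e.reg .rsp).toNat - 120) := List.mem_cons_self
    have hsz : Gif.Frames.DGifGetExtensionNext.size = 64 := rfl
    have hb : (e.reg .rsp).toNat - 120 + Gif.Frames.DGifGetExtensionNext.size ≤ (e.reg .rsp).toNat + 8 := by
      rw [hsz]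
      omega
    have hbuf : BufOK H rest (DGifGetExtensionNext.framesIn frames e) F R (s_109886.reg .rsi).toNat 1 := by
      apply BufOK.own henv.heap henv.ctx hbody.inv hb ho
      · rw [w_rsi]
        u_omega
      · rw [w_rsi]
        u_omega
    -- the clauses: `Env`, `rdi = gif`, `edx = 1`, `1 ≤ 1`, `1 < 2 ^ 31`, `BufOK`
    refine ⟨henv', ?_, ?_, by decide, by decide, hbuf⟩
    · rw [w_rdi]
      exact hrdi
    · rw [w_rdx]
      decide
  -- 0x10988b (ret2): INTERNALREAD HAS RETURNED. Its post: `k` bytes delivered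
  obtain ⟨k, hk1, hk2, hk3, hk4, hk5, hback⟩ :
    ReadPost H rest (DGifGetExtensionNext.framesIn frames e) F R 1 s_109886 s_109886r := w_post
  -- the reader at InternalRead's entry is the entry's: only the return address was pushed
  have hs0 : Mem.SameExcept [⟨(e.reg .rsp).toNat - 320, (e.reg .rsp).toNat - 136⟩] v.mem s_109886.mem := by
    rw [w_mem_109886]
    u_same
  have hrem0 : rem R s_109886.mem = rem R e.mem := by
    rw [← hrem_eq]
    apply rem_sameExcept hs0 (by omega)
    intro w hw
    have e := List.mem_singleton.mp hw
    rw [e]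
    simp only
    omega
  have e_top : (s_109886.reg .rsp).toNat + 8 = (e.reg .rsp).toNat - 136 := by
    rw [w_rsp_109886]
    u_omega
  -- the callee's footprint in terms of `v` (`w_same : SameExcept […] v.mem s_109886r.mem`)
  v_after_call w_rsp_109886 w_mem_109886
  simp only [w_rsi_109886] at w_same
  -- THE SLOTS AND THE RETURN ADDRESS, over the pushed return address (first step) and through InternalRead's footprint
  -- (second step: the buffer `Buf`, the cursor, the stack below)
  have hp_r15 : s_109886.mem.readLE (e.reg .rsp - 8) 8 = (e.reg .r15).toNat := by
    rw [w_mem_109886]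
    u_frame k_r15
  rw [w_mem_109886] at hp_r15
  have hs_r15 : s_109886r.mem.readLE (e.reg .rsp - 8) 8 = (e.reg .r15).toNat := by u_frame hp_r15
  have hp_r14 : s_109886.mem.readLE (e.reg .rsp - 16) 8 = (e.reg .r14).toNat := by
    rw [w_mem_109886]
    u_frame k_r14
  rw [w_mem_109886] at hp_r14
  have hs_r14 : s_109886r.mem.readLE (e.reg .rsp - 16) 8 = (e.reg .r14).toNat := by u_frame hp_r14
  have hp_r13 : s_109886.mem.readLE (e.reg .rsp - 24) 8 = (e.reg .r13).toNat := by
    rw [w_mem_109886]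
    u_frame k_r13
  rw [w_mem_109886] at hp_r13
  have hs_r13 : s_109886r.mem.readLE (e.reg .rsp - 24) 8 = (e.reg .r13).toNat := by u_frame hp_r13
  have hp_r12 : s_109886.mem.readLE (e.reg .rsp - 32) 8 = (e.reg .r12).toNat := by
    rw [w_mem_109886]
    u_frame k_r12
  rw [w_mem_109886] at hp_r12
  have hs_r12 : s_109886r.mem.readLE (e.reg .rsp - 32) 8 = (e.reg .r12).toNat := by u_frame hp_r12
  have hp_rbp : s_109886.mem.readLE (e.reg .rsp - 40) 8 = (e.reg .rbp).toNat := by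
    rw [w_mem_109886]
    u_frame k_rbp
  rw [w_mem_109886] at hp_rbp
  have hs_rbp : s_109886r.mem.readLE (e.reg .rsp - 40) 8 = (e.reg .rbp).toNat := by u_frame hp_rbp
  have hp_rbx : s_109886.mem.readLE (e.reg .rsp - 48) 8 = (e.reg .rbx).toNat := by
    rw [w_mem_109886]
    u_frame k_rbx
  rw [w_mem_109886] at hp_rbx
  have hs_rbx : s_109886r.mem.readLE (e.reg .rsp - 48) 8 = (e.reg .rbx).toNat := by u_frame hp_rbx
  have hp_ra : UInt64.ofNat (s_109886.mem.readLE (e.reg .rsp) 8) = ret := by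
    rw [w_mem_109886]
    u_frame k_ra
  rw [w_mem_109886] at hp_ra
  have hs_ra : UInt64.ofNat (s_109886r.mem.readLE (e.reg .rsp) 8) = ret := by u_frame hp_ra
  -- the footprint since the entry: InternalRead's windows lie inside the function's
  have hsame1 : Mem.SameExcept
    [⟨(e.reg .rsp).toNat - 320, (e.reg .rsp).toNat⟩,
     shadowSpan ((e.reg .rsp).toNat - 120) ((e.reg .rsp).toNat - 56),
     ⟨F.pv + 88, F.pv + 344⟩,
     ⟨(e.reg .rsi).toNat, (e.reg .rsi).toNat + 8⟩,
     ⟨F.gif + 96, F.gif + 100⟩,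
     ⟨R.cur, R.cur + 8⟩] e.mem s_109886r.mem := by u_same
  -- the heap's invariant comes back with the clean stack at the callee's `rsp + 8` = the body's `rsp`
  have hinv1 : HeapInv H rest (DGifGetExtensionNext.framesIn frames e) ((e.reg .rsp).toNat - 136) s_109886r.mem := by
    rw [← e_top]
    exact hback.inv
  -- THE EXIT ASSERTION: `Body` at `ret2` …
  have hbody1 : DGifGetExtensionNext.Body Gif.L.DGifGetExtensionNext.ret2 H rest frames F R u₀ e ret s_109886r := {
    entry := hbody.entry
    pre := hbody.pre
    ext_above := hbody.ext_above
    rip := w_rip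
    rsp := w_rsp
    rbx := (w_kept.get .rbx rfl).trans hbody.rbx
    r13 := (w_kept.get .r13 rfl).trans hbody.r13
    rbp := (w_kept.get .rbp rfl).trans hbody.rbp
    slot_r15 := hs_r15
    slot_r14 := hs_r14
    slot_r13 := hs_r13
    slot_r12 := hs_r12
    slot_rbp := hs_rbp
    slot_rbx := hs_rbx
    slot_ra := hs_ra
    inv := hinv1
    ok := hback.ok
    rem := by
      rw [← hrem0]
      exact hback.rem
    same := hsame1
    code := w_code
    abi := w_inv
  }
  -- … and what is live at `ret2`: pv in `r15`, the count in `eax`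
  refine ReachVia.done ?_
  exact {
    body := hbody1
    r15 := by
      rw [w_r15]
      u_omega
    count := by
      rw [hk4]
      exact hk1
    adv := by
      intro h1
      rw [hk4] at h1
      rw [hk5, hrem0]
      rw [hrem0] at hk2
      omega
  }

/-- **10988BH (ret2) … 1098A6H or 1098C3H** (dgif_lib.c:603-606): `cmp eax, 1`; one byte: `je` to 1098C3H (`AfterLen`); no byte:
the checked store of `gif.Error = 102`, `r12d = 0`: `Done` at 1098A6H. -/
theorem gen1_seg_tail (Lay : Layout) (hLay : Lay.hi = 0x1000000) (μ : Microarch) (hμ : UserX.MicroOK μ) (u₀ : State)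
    (hcode : HasCodeNat Lay u₀ Gif.L.DGifGetExtensionNext.entry Gif.Code.code_DGifGetExtensionNext.nat
      Gif.L.DGifGetExtensionNext.size)
    (H : Heap) (rest : List Obj) (frames : List (Nat × FrameLayout)) (F : Forest) (R : Rd) (e : State) (ret : Word)
    (h_asan_store4_noabort : Asan.SmallCheck Lay μ ProgX.Base.WayInv (ProgX.Base.CodeOK u₀) [.rax, .rcx, .rdx] 4
      ProgX.Base.L.__asan_store4_noabort.entry)
    (v : State) (hat : gen1_AtRet2 H rest frames F R u₀ e ret v) :
    ReachVia Lay μ ProgX.Base.WayInv v (fun w => DGifGetExtensionNext.Done H rest frames F R u₀ e ret w ∨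
      DGifGetExtensionNext.AfterLen H rest frames F R u₀ e ret w) := by
  -- THE PRELUDE: the entry assertion, as in `gen1_seg_call`
  obtain ⟨hbody, hr15, hcount, hadv⟩ := hat
  have he := hbody.entry
  v_entry he
  obtain ⟨henv, hrdi, hext⟩ := hbody.pre
  have w_rip := hbody.rip
  have c_rsp : v.reg .rsp = e.reg .rsp - 136 := hbody.rsp
  have c_rbx : v.reg .rbx = e.reg .rdi := hbody.rbx
  -- `eax` as a variable `z` (the branch fact of `cmp eax, 1` speaks of it)
  obtain ⟨z, c_rax⟩ : ∃ z, v.reg .rax = z := ⟨_, rfl⟩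
  rw [c_rax] at hcount hadv
  have w_kept : RegsKept [.rsp] v v := RegsKept.refl _ _
  have w_eq : Mem.EqOn ProgX.Base.L.textLo ProgX.Base.L.textHi u₀.mem v.mem := ProgX.Base.conv_code_eqOn hbody.code
  have hdf := (show abiInv _ from hbody.abi).1
  have hmx := (show abiInv _ from hbody.abi).2
  have hsse := ProgX.Base.sseOK_of_abiInv hbody.abi
  have k_r15 : v.mem.readLE (e.reg .rsp - 8) 8 = (e.reg .r15).toNat := hbody.slot_r15
  have k_r14 : v.mem.readLE (e.reg .rsp - 16) 8 = (e.reg .r14).toNat := hbody.slot_r14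
  have k_r13 : v.mem.readLE (e.reg .rsp - 24) 8 = (e.reg .r13).toNat := hbody.slot_r13
  have k_r12 : v.mem.readLE (e.reg .rsp - 32) 8 = (e.reg .r12).toNat := hbody.slot_r12
  have k_rbp : v.mem.readLE (e.reg .rsp - 40) 8 = (e.reg .rbp).toNat := hbody.slot_rbp
  have k_rbx : v.mem.readLE (e.reg .rsp - 48) 8 = (e.reg .rbx).toNat := hbody.slot_rbx
  have k_ra : UInt64.ofNat (v.mem.readLE (e.reg .rsp) 8) = ret := hbody.slot_ra
  have hsame : Mem.SameExcept
    [⟨(e.reg .rsp).toNat - 320, (e.reg .rsp).toNat⟩,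
     shadowSpan ((e.reg .rsp).toNat - 120) ((e.reg .rsp).toNat - 56),
     ⟨F.pv + 88, F.pv + 344⟩,
     ⟨(e.reg .rsi).toNat, (e.reg .rsi).toNat + 8⟩,
     ⟨F.gif + 96, F.gif + 100⟩,
     ⟨R.cur, R.cur + 8⟩] e.mem v.mem := hbody.same
  have hcur := henv.ctx.cursor_range henv.heap.inv.shadow
  have hgin := henv.ok.owns.inside henv.heap.inv.heap (o := (F.gif, 120)) List.mem_cons_self
  have hbase := henv.heap.base
  simp only at hgin
  rw [hbase] at hgin
  obtain ⟨hg1, -, -, -, hg2⟩ := hgin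
  -- gif is live under the body's frames: what the check goal asks
  have hgl : LiveIn (H.liveObjs ++ rest) (DGifGetExtensionNext.framesIn frames e) F.gif 120 :=
    hbody.ok.gif_live.liveIn rest _ (Nat.le_refl _) (Nat.le_refl _)
  -- THE WALK, both arms, to the two exits
  u_walk hcode [hμ.vendor] until [Gif.L.DGifGetExtensionNext.at_1098a6, Gif.L.DGifGetExtensionNext.at_1098c3]
    span [ProgX.Base.L.textLo, ProgX.Base.L.textHi] side (v_side)
  case check_109894 =>
    -- dgif_lib.c:604 the store of `gif.Error`: 4 bytes inside gif
    have hun : ShadowUntouched v.mem s_109894.mem := by v_untouched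
    exact hgl.accSmall hbody.inv.shadow hun _ 4 (by decide) (by u_omega) (by u_omega)
  · -- 0x1098c3 FROM 0x10988e (`je` taken): one byte was read, nothing stored since `ret2`
    -- the branch fact of `cmp eax, 1 ; je`: `eax = 1`
    have hz : z.toNat = 1 := by
      rw [toNat_part32] at hbr_10988e
      have e1 : (1 : Nat) % 2 ^ Width.w32.bits = 1 := by decide
      rw [e1] at hbr_10988e
      omega
    clear hbr_10988e
    -- THE EXIT ASSERTION: `Body` at 0x1098c3 …
    have hbody1 : DGifGetExtensionNext.Body Gif.L.DGifGetExtensionNext.at_1098c3 H rest frames F R u₀ e ret s_10988e := {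
      entry := hbody.entry
      pre := hbody.pre
      ext_above := hbody.ext_above
      rip := w_rip
      rsp := w_rsp
      rbx := (w_kept.get .rbx rfl).trans hbody.rbx
      r13 := (w_kept.get .r13 rfl).trans hbody.r13
      rbp := (w_kept.get .rbp rfl).trans hbody.rbp
      slot_r15 := by
        rw [w_mem]
        exact k_r15
      slot_r14 := by
        rw [w_mem]
        exact k_r14
      slot_r13 := by
        rw [w_mem]
        exact k_r13
      slot_r12 := by
        rw [w_mem]
        exact k_r12
      slot_rbp := by
        rw [w_mem]
        exact k_rbp
      slot_rbx := by
        rw [w_mem]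
        exact k_rbx
      slot_ra := by
        rw [w_mem]
        exact k_ra
      inv := by
        rw [w_mem]
        exact hbody.inv
      ok := by
        rw [w_mem]
        exact hbody.ok
      rem := by
        rw [w_mem]
        exact hbody.rem
      same := by
        rw [w_mem]
        exact hsame
      code := ProgX.Base.conv_code_in w_eq
      abi := by
        refine ProgX.Base.abiInv_of ?_ ?_
        · rw [w_flags]
          simp only [X86.User.df_setStatus]
          exact hdf
        · rw [w_mxcsr]
          exact hmx
    }
    -- … and what is live there: the count 1 in `rax`, pv in `r15`, exactly one byte consumed
    refine ReachVia.done (Or.inr ?_)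
    exact {
      body := hbody1
      rax := by
        rw [w_kept.get .rax rfl, c_rax]
        exact hz
      r15 := by
        rw [w_kept.get .r15 rfl]
        exact hr15
      rem_eq := by
        rw [w_mem]
        exact hadv hz
    }
  · -- 0x1098a6 FROM 0x1098a0: no byte, `gif.Error = D_GIF_ERR_READ_FAILED` stored, r12d = 0
    -- the two stores since `v`: the check call's return address (stack), then `gif.Error`
    obtain ⟨hinvA, hokA, hremA⟩ := store_stack hbody.inv hbody.ok ⟨hcur.1, hcur.2.1⟩ (e.reg .rsp - 144) 8 1087641
      (by u_omega) (by u_omega)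
    obtain ⟨hinvB, hokB, hremB⟩ := store_gif hinvA hokA ⟨hcur.1, hcur.2.1⟩ hbase (e.reg .rdi + 96) 4 102
      (Or.inr (Or.inr (by u_omega)))
    rw [← w_mem] at hinvB hokB hremB
    have hremF : rem R s_1098a0.mem = rem R v.mem := hremB.trans hremA
    -- THE EXIT ASSERTION: `Body` at 0x1098a6 …
    have hbody1 : DGifGetExtensionNext.Body Gif.L.DGifGetExtensionNext.at_1098a6 H rest frames F R u₀ e ret s_1098a0 := {
      entry := hbody.entry
      pre := hbody.pre
      ext_above := hbody.ext_above
      rip := w_rip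
      rsp := w_rsp
      rbx := (w_kept.get .rbx rfl).trans hbody.rbx
      r13 := (w_kept.get .r13 rfl).trans hbody.r13
      rbp := (w_kept.get .rbp rfl).trans hbody.rbp
      slot_r15 := by
        rw [w_mem]
        u_frame k_r15
      slot_r14 := by
        rw [w_mem]
        u_frame k_r14
      slot_r13 := by
        rw [w_mem]
        u_frame k_r13
      slot_r12 := by
        rw [w_mem]
        u_frame k_r12
      slot_rbp := by
        rw [w_mem]
        u_frame k_rbp
      slot_rbx := by
        rw [w_mem]
        u_frame k_rbx
      slot_ra := by
        rw [w_mem]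
        u_frame k_ra
      inv := hinvB
      ok := hokB
      rem := by
        rw [hremF]
        exact hbody.rem
      same := by
        rw [w_mem]
        u_same
      code := ProgX.Base.conv_code_in w_eq
      abi := by
        refine ProgX.Base.abiInv_of ?_ ?_
        · rw [w_flags]
          exact w_df_109894
        · rw [w_mxcsr]
          exact hmx
    }
    -- … and the result: GIF_ERROR in `r12`
    refine ReachVia.done (Or.inl ?_)
    exact {
      body := hbody1
      res := by
        right
        rw [w_r12]
        decide
      ok1 := by
        intro h1
        rw [w_r12] at h1
        exact absurd h1 (by decide)
    }

end Gif.Spec.DGifGetExtensionNext_1
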